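-- pv_equiv track=rewrite | github.com/podiumdesu/wallet-privacy-threats | analysis/request-interceptor/src/leak_types.py | dedupe_hits_longest_first
-- ===== SOURCE A (Python) =====
-- def dedupe_hits_longest_first(hits):
--     """
--     hits: list of tuples (surface, matched, stack, blob, ...optional...)
--     Returns a filtered list where, per surface, any match that is a substring
--     of another kept match is removed. This removes 'base' when '0xbase' is present.
--     """
--     from collections import defaultdict
--
--     by_surface = defaultdict(list)
--     for h in hits:
--         by_surface[h[0]].append(h)  # group by surface (URL/POST/Header/Cookie)
--
--     kept = []
--     for surface, group in by_surface.items():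
--         # sort by descending length of matched text
--         group_sorted = sorted(group, key=lambda x: len(x[1]), reverse=True)
--         kept_texts = []  # texts we've kept for this surface
--         for h in group_sorted:
--             m = h[1]
--             # if this match is a substring of any already kept longer match, skip it
--             if any(m in kt for kt in kept_texts):
--                 continue
--             kept_texts.append(m)
--             kept.append(h)
--     return kept
-- ===== SOURCE B (Python) =====
-- def dedupe_hits_longest_first(hits):
--     """
--     Alternative structure: surfaces via dict.fromkeys + a filter pass per surface
--     (no defaultdict of lists), and a stateless dedupe: a match is kept iff it is
--     not a substring of ANY earlier (longer-or-equal) match in the sorted group --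
--     there is no need to track which earlier matches were themselves kept, because
--     substring containment is transitive.
--     """
--     out = []
--     for surface in dict.fromkeys(h[0] for h in hits):
--         group = sorted((h for h in hits if h[0] == surface),
--                        key=lambda x: len(x[1]), reverse=True)
--         for i, h in enumerate(group):
--             if not any(h[1] in g[1] for g in group[:i]):
--                 out.append(h)
--     return out
-- ===== Notes on version B (the rewrite author's own statement) =====
-- stated objective: alternative
-- what changed: Replaces the defaultdict-of-lists grouping by dict.fromkeys of surfaces plus a filter pass per surface, and replaces the kept_texts accumulator by a stateless check against ALL earlier matches in the sorted group (correct because substring containment is transitive).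
import Mathlib
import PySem

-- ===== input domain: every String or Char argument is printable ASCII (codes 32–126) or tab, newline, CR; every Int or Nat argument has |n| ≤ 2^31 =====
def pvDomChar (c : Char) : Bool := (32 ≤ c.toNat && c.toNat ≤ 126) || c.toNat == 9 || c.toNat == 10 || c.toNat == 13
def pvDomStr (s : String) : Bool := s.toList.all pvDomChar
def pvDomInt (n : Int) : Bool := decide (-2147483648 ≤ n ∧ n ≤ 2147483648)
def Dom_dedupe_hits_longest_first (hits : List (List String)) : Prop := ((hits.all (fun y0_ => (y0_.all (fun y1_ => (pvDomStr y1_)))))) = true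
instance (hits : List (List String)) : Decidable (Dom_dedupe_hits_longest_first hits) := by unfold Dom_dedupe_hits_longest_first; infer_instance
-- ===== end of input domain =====

-- B replaces A's defaultdict grouping by dict.fromkeys + a filter pass per surface, and A's
-- kept_texts accumulator by a stateless check against all earlier matches in the sorted group
-- (sound because substring containment is transitive); objective: alternative (same cost).


-- ===== PORT A =====
def dedupe_hits_longest_first (hits : List (List String)) : List (List String) :=
  -- by_surface = defaultdict(list); for h in hits: by_surface[h[0]].append(h)
  let by_surface : PySem.Dict String (List (List String)) :=
    hits.foldl (fun d h => d.modify (PySem.List.pyGetD h 0 "") [] (fun g => g ++ [h]))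
      PySem.Dict.empty
  -- for surface, group in by_surface.items(): … (kept accumulated across surfaces)
  by_surface.items.foldl (fun kept sg =>
    let group_sorted := PySem.List.sorted sg.2 (fun x => PySem.Str.len (PySem.List.pyGetD x 1 "")) true
    (group_sorted.foldl (fun st h =>
        let m := PySem.List.pyGetD h 1 ""
        if st.1.any (fun kt => PySem.Str.isIn m kt) then st
        else (st.1 ++ [m], st.2 ++ [h]))
      (([] : List String), kept)).2) []

-- ===== PORT B =====
def dedupe_hits_longest_first_alt (hits : List (List String)) : List (List String) :=
  (PySem.List.dedup (hits.map (fun h => PySem.List.pyGetD h 0 ""))).foldl (fun out surface =>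
    let group := PySem.List.sorted (hits.filter (fun h => PySem.List.pyGetD h 0 "" == surface))
                   (fun x => PySem.Str.len (PySem.List.pyGetD x 1 "")) true
    (PySem.List.enumerate group).foldl (fun out p =>
      if (PySem.List.slice group none (some p.1)).any
           (fun g => PySem.Str.isIn (PySem.List.pyGetD p.2 1 "") (PySem.List.pyGetD g 1 "")) then out
      else out ++ [p.2]) out) []

-- ===== PRECONDITION & SPEC =====
-- Pre_ excludes exactly the inputs on which Python A raises IndexError (a hit shorter than 2,
-- so h[0] or h[1] is out of range); B raises there as well.
def Pre_dedupe_hits_longest_first (hits : List (List String)) : Prop :=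
  ∀ h ∈ hits, 2 ≤ h.length
instance (hits : List (List String)) : Decidable (Pre_dedupe_hits_longest_first hits) := by
  unfold Pre_dedupe_hits_longest_first; infer_instance
def pvWitness_dedupe_hits_longest_first : List (List String) :=
  [["URL", "0xab"], ["URL", "ab"], ["POST", "x"]]
def Spec_dedupe_hits_longest_first (hits : List (List String)) (out : List (List String)) : Prop := out = dedupe_hits_longest_first_alt hits
instance (hits : List (List String)) (out : List (List String)) : Decidable (Spec_dedupe_hits_longest_first hits out) := by unfold Spec_dedupe_hits_longest_first; infer_instance

-- ===== CLAIM (what is proved, stated in full; the proofs are below) =====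
def Claim_equal_dedupe_hits_longest_first : Prop := ∀ (hits : List (List String)), Dom_dedupe_hits_longest_first hits → Pre_dedupe_hits_longest_first hits → Spec_dedupe_hits_longest_first hits (dedupe_hits_longest_first hits)

-- ===== LEMMAS AND PROOFS =====

-- the per-surface dedupe, written once as a recursion over the sorted group with the list P of
-- ALL earlier hits (B's view of the loop)
def pvInnerRec (P : List (List String)) : List (List String) → List (List String)
  | [] => []
  | h :: t =>
      if P.any (fun g => PySem.Str.isIn (PySem.List.pyGetD h 1 "") (PySem.List.pyGetD g 1 "")) then
        pvInnerRec (P ++ [h]) t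
      else h :: pvInnerRec (P ++ [h]) t

theorem pvIsIn_trans {a b c : String} (h1 : PySem.Str.isIn a b = true)
    (h2 : PySem.Str.isIn b c = true) : PySem.Str.isIn a c = true := by
  rw [PySem.Str.isIn_iff_infix] at *
  exact h1.trans h2

-- A's inner loop (kept_texts accumulator) computes pvInnerRec, for any kts equivalent to P
theorem pvInnerA_eq (t : List (List String)) (kts : List String) (kept P : List (List String))
    (hinv : ∀ m : String, kts.any (fun kt => PySem.Str.isIn m kt)
              = P.any (fun g => PySem.Str.isIn m (PySem.List.pyGetD g 1 ""))) :
    (t.foldl (fun st h =>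
        let m := PySem.List.pyGetD h 1 ""
        if st.1.any (fun kt => PySem.Str.isIn m kt) then st
        else (st.1 ++ [m], st.2 ++ [h])) (kts, kept)).2
      = kept ++ pvInnerRec P t := by
  induction t generalizing kts kept P with
  | nil => simp [pvInnerRec]
  | cons h t ih =>
    simp only [List.foldl_cons, pvInnerRec]
    rw [hinv (PySem.List.pyGetD h 1 "")]
    by_cases hc : P.any (fun g => PySem.Str.isIn (PySem.List.pyGetD h 1 "") (PySem.List.pyGetD g 1 "")) = true
    · simp only [hc, if_true]
      rw [ih kts kept (P ++ [h])]
      intro m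
      rw [hinv m]
      simp only [List.any_append, List.any_cons, List.any_nil, Bool.or_false]
      cases hm : PySem.Str.isIn m (PySem.List.pyGetD h 1 "") with
      | false => simp
      | true =>
        simp only [Bool.or_true]
        rcases List.any_eq_true.mp hc with ⟨g, hg, hgi⟩
        exact List.any_eq_true.mpr ⟨g, hg, pvIsIn_trans hm hgi⟩
    · simp only [hc, if_false, Bool.false_eq_true]
      have hinv' : ∀ m : String,
          ((kts ++ [PySem.List.pyGetD h 1 ""]).any fun kt => PySem.Str.isIn m kt)
            = (P ++ [h]).any (fun g => PySem.Str.isIn m (PySem.List.pyGetD g 1 "")) := by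
        intro m
        simp only [List.any_append, List.any_cons, List.any_nil, Bool.or_false, hinv m]
      rw [ih (kts ++ [PySem.List.pyGetD h 1 ""]) (kept ++ [h]) (P ++ [h]) hinv', List.append_assoc]
      rfl

-- B's inner loop (enumerate + prefix slice) computes pvInnerRec
theorem pvInnerB_eq (g : List (List String)) (t : List (List String)) (n : Nat) (out : List (List String))
    (hdrop : g.drop n = t) :
    (PySem.List.enumerate t (n : Int)).foldl (fun out p =>
      if (PySem.List.slice g none (some p.1)).any
           (fun g' => PySem.Str.isIn (PySem.List.pyGetD p.2 1 "") (PySem.List.pyGetD g' 1 "")) then out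
      else out ++ [p.2]) out
      = out ++ pvInnerRec (g.take n) t := by
  induction t generalizing n out with
  | nil => simp [PySem.List.enumerate_nil, pvInnerRec]
  | cons h t ih =>
    rw [PySem.List.enumerate_cons, List.foldl_cons, pvInnerRec]
    have htake : g.take (n + 1) = g.take n ++ [h] := by
      have hn : g[n]? = some h := by
        have := congrArg List.head? hdrop
        rwa [List.head?_drop] at this
      rw [List.take_add_one, hn]
      rfl
    have hcast : ((n : Int) + 1) = ((n + 1 : Nat) : Int) := by push_cast; ring
    have hdrop' : g.drop (n + 1) = t := by
      have := congrArg List.tail hdrop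
      simpa [List.tail_drop] using this
    rw [PySem.List.slice_to_natCast]
    by_cases hc : (g.take n).any
        (fun g' => PySem.Str.isIn (PySem.List.pyGetD h 1 "") (PySem.List.pyGetD g' 1 "")) = true
    · simp only [hc, if_true]
      rw [hcast, ih (n + 1) out hdrop', htake]
    · simp only [hc, if_false, Bool.false_eq_true]
      rw [hcast, ih (n + 1) (out ++ [h]) hdrop', htake, List.append_assoc]
      rfl

-- the grouping dict A builds: its items are (surface, all hits with that surface), surfaces in
-- first-occurrence order
theorem pvItems_eq (hits : List (List String)) :
    (hits.foldl (fun d h => d.modify (PySem.List.pyGetD h 0 "") [] (fun g => g ++ [h]))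
        (PySem.Dict.empty : PySem.Dict String (List (List String)))).items
      = (PySem.List.dedup (hits.map (fun h => PySem.List.pyGetD h 0 ""))).map
          (fun s => (s, hits.filter (fun h => PySem.List.pyGetD h 0 "" == s))) := by
  set d := hits.foldl (fun d h => d.modify (PySem.List.pyGetD h 0 "") [] (fun g => g ++ [h]))
      (PySem.Dict.empty : PySem.Dict String (List (List String))) with hd
  have hnd : d.keys.Nodup := by
    rw [hd]
    exact PySem.Dict.nodup_keys_foldl_modify_key hits (fun h => PySem.List.pyGetD h 0 "")
      [] (fun _ h g => g ++ [h]) PySem.Dict.empty (by simp [PySem.Dict.keys_empty])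
  have hkeys : d.keys = PySem.List.dedup (hits.map (fun h => PySem.List.pyGetD h 0 "")) := by
    rw [hd, PySem.Dict.keys_foldl_modify_key, PySem.Dict.keys_empty,
      PySem.Set.update_nil_left, PySem.List.dedup_eq_ofList]
  have hget : ∀ s, d.getD s [] = hits.filter (fun h => PySem.List.pyGetD h 0 "" == s) := by
    intro s
    have hmap : d = (hits.map (fun h => (PySem.List.pyGetD h 0 "", h))).foldl
        (fun d p => d.modify p.1 [] (fun g => g ++ [p.2])) PySem.Dict.empty := by
      rw [hd, List.foldl_map]
    rw [hmap, PySem.Dict.getD_foldl_modify_append, PySem.Dict.getD_empty, List.nil_append,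
      List.filter_map, List.map_map]
    simp [Function.comp_def]
  rw [PySem.Dict.items_eq_map_keys d hnd [], hkeys]
  exact List.map_congr_left (fun s _ => by rw [hget s])

theorem pvInnerB_zero (g : List (List String)) (out : List (List String)) :
    (PySem.List.enumerate g).foldl (fun out p =>
      if (PySem.List.slice g none (some p.1)).any
           (fun g' => PySem.Str.isIn (PySem.List.pyGetD p.2 1 "") (PySem.List.pyGetD g' 1 "")) then out
      else out ++ [p.2]) out
      = out ++ pvInnerRec [] g := by
  have h := pvInnerB_eq g g 0 out rfl
  simpa using h

-- ===== VERDICT (by name: the statement is the Claim_ definition above) =====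
theorem dedupe_hits_longest_first_spec : Claim_equal_dedupe_hits_longest_first := by
  intro hits _ _
  show dedupe_hits_longest_first hits = dedupe_hits_longest_first_alt hits
  simp only [dedupe_hits_longest_first, dedupe_hits_longest_first_alt]
  rw [pvItems_eq, List.foldl_map]
  apply PySem.List.foldl_congr_mem
  intro kept s _
  rw [pvInnerA_eq _ [] kept [] (by intro m; simp), pvInnerB_zero]
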